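-- pv_equiv track=rewrite | github.com/aw449/Human-Robot-Interaction | DataExporter.py | find_timeindex
-- ===== SOURCE A (Python) =====
-- def find_timeindex(l, k, j):
--     time = -1
--     inside = False
--     for i in range(len(l)):
--         if j <= l[i] <= k:
--             if not inside:
--                 time = i
--                 inside = True
--         else:
--             inside = False
--     return time
-- ===== SOURCE B (Python) =====
-- def find_timeindex(l, k, j):
--     i = len(l) - 1
--     while i >= 0 and not (j <= l[i] <= k):
--         i -= 1
--     if i < 0:
--         return -1
--     while i >= 0 and j <= l[i] <= k:
--         i -= 1
--     return i + 1
-- ===== Notes on version B (the rewrite author's own statement) =====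
-- stated objective: alternative
-- what changed: Replaces A's full forward state-machine sweep (tracking an 'inside a run' flag over every index) with a backward scan: walk from the end to the last in-range element, then extend that run backward and return the index after it; on average only the tail of the list is inspected.
import Mathlib
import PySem

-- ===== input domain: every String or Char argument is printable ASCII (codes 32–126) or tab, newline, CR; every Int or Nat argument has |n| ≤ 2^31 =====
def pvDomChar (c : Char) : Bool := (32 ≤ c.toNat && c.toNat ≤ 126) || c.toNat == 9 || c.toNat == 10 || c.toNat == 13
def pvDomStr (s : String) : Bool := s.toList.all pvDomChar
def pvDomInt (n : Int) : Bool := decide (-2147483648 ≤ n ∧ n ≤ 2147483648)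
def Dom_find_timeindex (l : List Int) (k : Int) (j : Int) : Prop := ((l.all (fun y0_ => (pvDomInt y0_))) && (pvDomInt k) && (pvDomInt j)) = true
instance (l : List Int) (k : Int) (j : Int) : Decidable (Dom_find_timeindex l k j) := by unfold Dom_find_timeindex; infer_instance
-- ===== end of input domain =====

-- B replaces A's forward state-machine sweep with a backward scan for the last in-range run
-- (alternative decomposition, same value everywhere; same asymptotic cost).

-- ===== PORT A =====
-- A's loop state: (time, inside); iterate over indexed elements in order.
def findStep (k : Int) (j : Int) (st : Int × Bool) (p : Int × Int) : Int × Bool :=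
  if j ≤ p.2 ∧ p.2 ≤ k then
    (if st.2 then st else (p.1, true))
  else
    (st.1, false)

def find_timeindex (l : List Int) (k : Int) (j : Int) : Int :=
  ((PySem.List.enumerate l).foldl (findStep k j) (-1, false)).1

-- ===== PORT B =====
-- first while loop: current index is n-1; find the last in-range index, scanning downward
def dropOut (l : List Int) (k : Int) (j : Int) : Nat → Option Nat
  | 0 => none
  | n+1 => if j ≤ l.getD n 0 ∧ l.getD n 0 ≤ k then some n else dropOut l k j n

-- second while loop: current index is n-1; walk down while in range, return (last index walked past)+1
def dropIn (l : List Int) (k : Int) (j : Int) : Nat → Nat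
  | 0 => 0
  | n+1 => if j ≤ l.getD n 0 ∧ l.getD n 0 ≤ k then dropIn l k j n else n+1

def find_timeindex_alt (l : List Int) (k : Int) (j : Int) : Int :=
  match dropOut l k j l.length with
  | none => -1
  | some i => (dropIn l k j (i+1) : Int)

-- ===== PRECONDITION & SPEC =====
def Spec_find_timeindex (l : List Int) (k : Int) (j : Int) (out : Int) : Prop := out = find_timeindex_alt l k j
instance (l : List Int) (k : Int) (j : Int) (out : Int) : Decidable (Spec_find_timeindex l k j out) := by unfold Spec_find_timeindex; infer_instance

-- ===== CLAIM (what is proved, stated in full; the proofs are below) =====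
def Claim_equal_find_timeindex : Prop := ∀ (l : List Int) (k : Int) (j : Int), Dom_find_timeindex l k j → Spec_find_timeindex l k j (find_timeindex l k j)

-- ===== LEMMAS AND PROOFS =====

lemma dropOut_lt (l : List Int) (k j : Int) (n i : Nat) (h : dropOut l k j n = some i) : i < n := by
  induction n with
  | zero => simp [dropOut] at h
  | succ m ih =>
    rw [dropOut] at h
    split at h
    · simp at h; omega
    · exact Nat.lt_succ_of_lt (ih h)

lemma dropOut_append (l : List Int) (x k j : Int) (n : Nat) (hn : n ≤ l.length) :
    dropOut (l ++ [x]) k j n = dropOut l k j n := by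
  induction n with
  | zero => rfl
  | succ m ih =>
    rw [dropOut, dropOut, ih (by omega),
      show (l ++ [x]).getD m 0 = l.getD m 0 by
        simp [List.getD, List.getElem?_append_left (by omega : m < l.length)]]

lemma dropIn_append (l : List Int) (x k j : Int) (n : Nat) (hn : n ≤ l.length) :
    dropIn (l ++ [x]) k j n = dropIn l k j n := by
  induction n with
  | zero => rfl
  | succ m ih =>
    rw [dropIn, dropIn, ih (by omega),
      show (l ++ [x]).getD m 0 = l.getD m 0 by
        simp [List.getD, List.getElem?_append_left (by omega : m < l.length)]]

lemma getD_append_last (l : List Int) (x : Int) : (l ++ [x]).getD l.length 0 = x := by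
  simp [List.getD]

-- when l does not end with an in-range element, the second backward walk stops immediately
lemma dropIn_full (l : List Int) (k j : Int)
    (h : ¬ (0 < l.length ∧ (j ≤ l.getD (l.length - 1) 0 ∧ l.getD (l.length - 1) 0 ≤ k))) :
    dropIn l k j l.length = l.length := by
  cases hl : l.length with
  | zero => rfl
  | succ m =>
    rw [dropIn, if_neg]
    intro hc
    exact h ⟨by omega, by rwa [hl, Nat.add_sub_cancel]⟩

-- when l ends with an in-range element, B's answer on l is dropIn l l.length
lemma alt_of_last_in (l : List Int) (k j : Int)
    (h : 0 < l.length ∧ (j ≤ l.getD (l.length - 1) 0 ∧ l.getD (l.length - 1) 0 ≤ k)) :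
    find_timeindex_alt l k j = (dropIn l k j l.length : Int) := by
  obtain ⟨m, hm⟩ : ∃ m, l.length = m + 1 := ⟨l.length - 1, by omega⟩
  have hlm : j ≤ l.getD m 0 ∧ l.getD m 0 ≤ k := by
    have := h.2; rwa [hm, Nat.add_sub_cancel] at this
  rw [find_timeindex_alt, hm, dropOut, if_pos hlm]

-- how B's answer evolves when one element is appended
lemma alt_append (l : List Int) (x k j : Int) :
    find_timeindex_alt (l ++ [x]) k j =
      if j ≤ x ∧ x ≤ k then
        (if 0 < l.length ∧ (j ≤ l.getD (l.length - 1) 0 ∧ l.getD (l.length - 1) 0 ≤ k)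
          then find_timeindex_alt l k j else (l.length : Int))
      else find_timeindex_alt l k j := by
  have hlen : (l ++ [x]).length = l.length + 1 := by simp
  by_cases hx : j ≤ x ∧ x ≤ k
  · rw [if_pos hx]
    have h1 : find_timeindex_alt (l ++ [x]) k j = (dropIn l k j l.length : Int) := by
      rw [find_timeindex_alt, hlen, dropOut,
        show (l ++ [x]).getD l.length 0 = x from getD_append_last l x, if_pos hx]
      show ((dropIn (l ++ [x]) k j (l.length + 1) : Nat) : Int) = _
      rw [dropIn, show (l ++ [x]).getD l.length 0 = x from getD_append_last l x, if_pos hx,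
        dropIn_append l x k j l.length (le_refl _)]
    by_cases hc : 0 < l.length ∧ (j ≤ l.getD (l.length - 1) 0 ∧ l.getD (l.length - 1) 0 ≤ k)
    · rw [if_pos hc, h1, alt_of_last_in l k j hc]
    · rw [if_neg hc, h1, dropIn_full l k j hc]
  · rw [if_neg hx, find_timeindex_alt, hlen, dropOut,
      show (l ++ [x]).getD l.length 0 = x from getD_append_last l x, if_neg hx,
      dropOut_append l x k j l.length (le_refl _), find_timeindex_alt]
    cases hdo : dropOut l k j l.length with
    | none => rfl
    | some i =>
      have hi := dropOut_lt l k j _ _ hdo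
      simp only []
      rw [dropIn_append l x k j (i + 1) (by omega)]

-- main invariant: A's fold state has B's answer as first component, and the 'inside' flag
-- says exactly 'the list is nonempty and its last element is in range'.
lemma find_invariant (k j : Int) (l : List Int) :
    ((PySem.List.enumerate l).foldl (findStep k j) (-1, false)).1 = find_timeindex_alt l k j
    ∧ (((PySem.List.enumerate l).foldl (findStep k j) (-1, false)).2
        = true ↔ (0 < l.length ∧ (j ≤ l.getD (l.length - 1) 0 ∧ l.getD (l.length - 1) 0 ≤ k))) := by
  induction l using List.reverseRecOn with
  | nil => simp [PySem.List.enumerate, find_timeindex_alt, dropOut]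
  | append_singleton l x ih =>
    obtain ⟨ih1, ih2⟩ := ih
    have hfold : (PySem.List.enumerate (l ++ [x])).foldl (findStep k j) (-1, false)
        = findStep k j ((PySem.List.enumerate l).foldl (findStep k j) (-1, false)) ((l.length : Int), x) := by
      show (PySem.List.enumerate (l ++ [x]) 0).foldl (findStep k j) (-1, false) = _
      rw [PySem.List.enumerate_append, List.foldl_append]
      simp [PySem.List.enumerate]
    have hlast : (l ++ [x]).getD ((l ++ [x]).length - 1) 0 = x := by
      have : (l ++ [x]).length - 1 = l.length := by simp
      rw [this, getD_append_last]
    have hlenpos : 0 < (l ++ [x]).length := by simp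
    rw [hfold, alt_append, findStep]
    by_cases hx : j ≤ x ∧ x ≤ k
    · rw [if_pos hx, if_pos hx]
      by_cases hin : ((PySem.List.enumerate l).foldl (findStep k j) (-1, false)).2 = true
      · rw [if_pos hin, if_pos (ih2.mp hin)]
        exact ⟨ih1, by rw [hlast]; exact ⟨fun _ => ⟨hlenpos, hx⟩, fun _ => hin⟩⟩
      · rw [if_neg hin, if_neg (fun hc => hin (ih2.mpr hc))]
        exact ⟨rfl, by rw [hlast]; simp [hx]⟩
    · rw [if_neg hx, if_neg hx]
      refine ⟨ih1, ?_⟩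
      rw [hlast]
      simp [hx]

-- ===== VERDICT (by name: the statement is the Claim_ definition above) =====
theorem find_timeindex_spec : Claim_equal_find_timeindex := by
  intro l k j _
  unfold Spec_find_timeindex find_timeindex
  exact (find_invariant k j l).1
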